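-- pv_equiv track=rewrite | github.com/seancheick/PharmaGuide_Pipeline | scripts/api_audit/enrich_chembl_bioactivity.py | _extract_bioactivity_summary
-- ===== SOURCE A (Python) =====
-- def _extract_bioactivity_summary(activities: list[dict]) -> list[dict]:
--     """Summarize top bioactivity records."""
--     results = []
--     seen_targets: set[str] = set()
--     for act in activities:
--         target_id = act.get("target_chembl_id", "")
--         if target_id in seen_targets:
--             continue
--         seen_targets.add(target_id)
--         results.append({
--             "target_chembl_id": target_id,
--             "target_pref_name": act.get("target_pref_name"),
--             "target_organism": act.get("target_organism"),
--             "standard_type": act.get("standard_type"),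
--             "standard_value": act.get("standard_value"),
--             "standard_units": act.get("standard_units"),
--             "pchembl_value": act.get("pchembl_value"),
--         })
--         if len(results) >= 5:
--             break
--     return results
-- ===== SOURCE B (Python) =====
-- def _extract_bioactivity_summary(activities: list[dict]) -> list[dict]:
--     """Summarize top bioactivity records."""
--     out = []
--     pending = activities
--     while pending and len(out) < 5:
--         act = pending[0]
--         tid = act.get("target_chembl_id", "")
--         out.append({
--             "target_chembl_id": tid,
--             "target_pref_name": act.get("target_pref_name"),
--             "target_organism": act.get("target_organism"),
--             "standard_type": act.get("standard_type"),
--             "standard_value": act.get("standard_value"),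
--             "standard_units": act.get("standard_units"),
--             "pchembl_value": act.get("pchembl_value"),
--         })
--         pending = [a for a in pending[1:] if a.get("target_chembl_id", "") != tid]
--     return out
-- ===== Notes on version B (the rewrite author's own statement) =====
-- stated objective: alternative
-- what changed: Dedup by repeatedly taking the head record and filtering every record with the same target id out of the remaining list (at most 5 rounds), instead of one pass over all records with a seen-set and early break.
import Mathlib
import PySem

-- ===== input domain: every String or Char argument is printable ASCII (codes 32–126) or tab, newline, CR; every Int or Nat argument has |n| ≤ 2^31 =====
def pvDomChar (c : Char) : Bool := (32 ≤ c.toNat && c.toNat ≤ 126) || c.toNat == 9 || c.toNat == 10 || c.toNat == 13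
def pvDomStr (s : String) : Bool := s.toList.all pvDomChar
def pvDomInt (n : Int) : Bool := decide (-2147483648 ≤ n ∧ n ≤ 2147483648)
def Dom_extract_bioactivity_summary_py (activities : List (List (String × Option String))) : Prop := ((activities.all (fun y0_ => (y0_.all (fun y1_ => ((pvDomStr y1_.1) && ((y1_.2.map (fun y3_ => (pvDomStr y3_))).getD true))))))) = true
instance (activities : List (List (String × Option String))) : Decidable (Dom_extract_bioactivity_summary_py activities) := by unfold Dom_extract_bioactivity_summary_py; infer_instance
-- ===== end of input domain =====

-- B dedups by repeatedly taking the head record and filtering all records with the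
-- same target id out of the remaining list (at most 5 rounds), instead of A's single
-- pass with a seen-set and early break; same return value, objective: alternative.

-- shared helper: act.get(key, dflt) on the association-list dict (first match wins)
def pvGet (act : List (String × Option String)) (k : String) (dflt : Option String) : Option String :=
  match act.find? (fun p => p.1 == k) with
  | some p => p.2
  | none => dflt

-- the seven-field summary dict built from one activity record
def pvSummary (act : List (String × Option String)) : List (String × Option String) :=
  [("target_chembl_id", pvGet act "target_chembl_id" (some "")),
   ("target_pref_name", pvGet act "target_pref_name" none),
   ("target_organism", pvGet act "target_organism" none),
   ("standard_type", pvGet act "standard_type" none),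
   ("standard_value", pvGet act "standard_value" none),
   ("standard_units", pvGet act "standard_units" none),
   ("pchembl_value", pvGet act "pchembl_value" none)]

-- ===== PORT A =====
-- A's loop: skip seen targets, append summary, break once 5 results are collected
def pvGoA : List (List (String × Option String)) → List (List (String × Option String)) →
    PySem.Set (Option String) → List (List (String × Option String))
  | [], results, _ => results
  | act :: rest, results, seen =>
    let target_id := pvGet act "target_chembl_id" (some "")
    if target_id ∈ seen then
      pvGoA rest results seen
    else
      let results' := results ++ [pvSummary act]
      if 5 ≤ results'.length then results'
      else pvGoA rest results' (PySem.Set.add seen target_id)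

def extract_bioactivity_summary_py (activities : List (List (String × Option String))) : List (List (String × Option String)) :=
  pvGoA activities [] PySem.Set.empty

-- ===== PORT B =====
-- B's while loop: while pending and len(out) < 5, summarize pending[0] and filter
-- its target id out of the tail (the filtered tail is shorter, hence termination)
def pvGoB : List (List (String × Option String)) → List (List (String × Option String)) →
    List (List (String × Option String))
  | [], out => out
  | act :: rest, out =>
    if out.length < 5 then
      pvGoB (rest.filter (fun a => pvGet a "target_chembl_id" (some "") ≠ pvGet act "target_chembl_id" (some ""))) (out ++ [pvSummary act])
    else out
termination_by pending _ => pending.length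
decreasing_by
  simp only [List.length_unattach]
  exact Nat.lt_succ_of_le (le_trans (List.length_filter_le _ _) (by simp))

def extract_bioactivity_summary_py_alt (activities : List (List (String × Option String))) : List (List (String × Option String)) :=
  pvGoB activities []

-- ===== PRECONDITION & SPEC =====
def Spec_extract_bioactivity_summary_py (activities : List (List (String × Option String))) (out : List (List (String × Option String))) : Prop := out = extract_bioactivity_summary_py_alt activities
instance (activities : List (List (String × Option String))) (out : List (List (String × Option String))) : Decidable (Spec_extract_bioactivity_summary_py activities out) := by unfold Spec_extract_bioactivity_summary_py; infer_instance

-- ===== CLAIM (what is proved, stated in full; the proofs are below) =====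
def Claim_equal_extract_bioactivity_summary_py : Prop := ∀ (activities : List (List (String × Option String))), Dom_extract_bioactivity_summary_py activities → Spec_extract_bioactivity_summary_py activities (extract_bioactivity_summary_py activities)

-- ===== LEMMAS AND PROOFS =====

-- break-free version of A's loop: all first-occurrence summaries, in order
def pvFull : List (List (String × Option String)) → PySem.Set (Option String) →
    List (List (String × Option String))
  | [], _ => []
  | act :: rest, seen =>
    let t := pvGet act "target_chembl_id" (some "")
    if t ∈ seen then pvFull rest seen
    else pvSummary act :: pvFull rest (PySem.Set.add seen t)

-- unbounded filter-based dedup (B's strategy without the 5-cap)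
def pvNub : List (List (String × Option String)) → List (List (String × Option String))
  | [] => []
  | act :: rest =>
    pvSummary act :: pvNub (rest.filter (fun a => pvGet a "target_chembl_id" (some "") ≠ pvGet act "target_chembl_id" (some "")))
termination_by pending => pending.length
decreasing_by
  simp only [List.length_unattach]
  exact Nat.lt_succ_of_le (le_trans (List.length_filter_le _ _) (by simp))

-- A's loop with break = take (5 - |results|) of the break-free stream
theorem pvGoA_eq_take (acts : List (List (String × Option String)))
    (results : List (List (String × Option String))) (seen : PySem.Set (Option String))
    (h : results.length < 5) :
    pvGoA acts results seen = results ++ (pvFull acts seen).take (5 - results.length) := by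
  induction acts generalizing results seen with
  | nil => simp [pvGoA, pvFull]
  | cons act rest ih =>
    simp only [pvGoA, pvFull]
    by_cases hm : pvGet act "target_chembl_id" (some "") ∈ seen
    · simp [hm, ih _ _ h]
    · simp only [hm, if_false, List.length_append, List.length_cons, List.length_nil]
      by_cases h5 : 5 ≤ results.length + 1
      · have h4 : results.length = 4 := by omega
        simp [h4]
      · have hlt : (results ++ [pvSummary act]).length < 5 := by
          simp; omega
        rw [if_neg (by simpa using h5), ih _ _ hlt]
        have : 5 - results.length = (5 - (results ++ [pvSummary act]).length) + 1 := by
          simp; omega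
        simp [this, List.take_succ_cons]

-- the seen-set pass equals the filter-based dedup of the not-yet-seen records
theorem pvFull_eq_pvNub (acts : List (List (String × Option String)))
    (seen : PySem.Set (Option String)) :
    pvFull acts seen = pvNub (acts.filter (fun a => pvGet a "target_chembl_id" (some "") ∉ seen)) := by
  induction hn : acts.length using Nat.strong_induction_on generalizing acts seen with
  | _ n ih =>
    cases acts with
    | nil => simp [pvFull, pvNub]
    | cons act rest =>
      simp only [pvFull]
      by_cases hm : pvGet act "target_chembl_id" (some "") ∈ seen
      · simp only [hm, if_true, List.filter_cons, decide_eq_true_eq]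
        rw [if_neg (by simp)]
        exact ih rest.length (by simp [← hn]) rest seen rfl
      · simp only [hm, if_false, List.filter_cons]
        rw [if_pos (by simp), pvNub]
        congr 1
        rw [ih rest.length (by simp [← hn]) rest (PySem.Set.add seen (pvGet act "target_chembl_id" (some ""))) rfl,
          List.filter_filter]
        congr 1
        apply List.filter_congr
        intro a _
        by_cases h1 : pvGet a "target_chembl_id" (some "") = pvGet act "target_chembl_id" (some "") <;>
          by_cases h2 : pvGet a "target_chembl_id" (some "") ∈ seen <;>
            simp [PySem.Set.mem_add, h1, h2]

-- B's loop = out ++ take (5 - |out|) of the filter-based dedup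
theorem pvGoB_eq_take (pending out : List (List (String × Option String))) :
    pvGoB pending out = out ++ (pvNub pending).take (5 - out.length) := by
  induction hn : pending.length using Nat.strong_induction_on generalizing pending out with
  | _ n ih =>
    cases pending with
    | nil => simp [pvGoB, pvNub]
    | cons act rest =>
      simp only [pvGoB, pvNub]
      by_cases h5 : out.length < 5
      · rw [if_pos h5,
          ih _ (by simp [← hn]; exact List.length_filter_le _ _) _ _ rfl]
        have : 5 - out.length = (5 - (out ++ [pvSummary act]).length) + 1 := by
          simp; omega
        simp [this, List.take_succ_cons]
      · rw [if_neg h5]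
        have : 5 - out.length = 0 := by omega
        simp [this]

-- ===== VERDICT (by name: the statement is the Claim_ definition above) =====
theorem extract_bioactivity_summary_py_spec : Claim_equal_extract_bioactivity_summary_py := by
  intro activities _
  unfold Spec_extract_bioactivity_summary_py extract_bioactivity_summary_py extract_bioactivity_summary_py_alt
  rw [pvGoA_eq_take activities [] PySem.Set.empty (by simp),
    pvFull_eq_pvNub activities PySem.Set.empty, pvGoB_eq_take activities []]
  simp [PySem.Set.empty]
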